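-- pv_equiv track=rewrite | github.com/BlackNoodle/coding_test | 18.py | ar
-- ===== SOURCE A (Python) =====
-- def ri(s):
--     cnt = 0
--
--     for i in s:
--         if i == "(":
--             cnt += 1
--         else:
--             cnt -= 1
--
--         if cnt < 0:
--             return False
--
--     return True
--
-- def ar(s):
--     if s == "":
--         return ""
--
--     cnt = 0
--     index = None
--     for i in range(len(s)):
--         if s[i] == "(":
--             cnt += 1
--         else:
--             cnt -= 1
--
--         if cnt == 0:
--             index = i
--             break
--     u = s[:i + 1]
--     v = s[i + 1:]
--
--     if ri(u):
--         return u + ar(v)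
--     else:
--         tmp = ""
--         tmp += "("
--         tmp += ar(v)
--         tmp += ")"
--         new_u = ""
--         for i in u[1:-1]:
--             if i == "(":
--                 new_u += ")"
--             else:
--                 new_u += "("
--         tmp += new_u
--         return tmp
-- ===== SOURCE B (Python) =====
-- def ar(s):
--     # One pass: split s at points where the running balance returns to 0,
--     # keep "good" pieces (balance never negative) in a front list and push
--     # inverted bad pieces onto a back list; join once at the end.
--     pre = []
--     suf = []
--     cnt = 0
--     ok = True
--     cur = []
--     for c in s:
--         cur.append(c)
--         if c == "(":
--             cnt += 1
--         else:
--             cnt -= 1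
--         if cnt < 0:
--             ok = False
--         if cnt == 0:
--             if ok:
--                 pre.append("".join(cur))
--             else:
--                 pre.append("(")
--                 suf.append(")" + "".join(")" if x == "(" else "(" for x in cur[1:-1]))
--             ok = True
--             cur = []
--     if cur:
--         if ok:
--             pre.append("".join(cur))
--         else:
--             pre.append("(")
--             suf.append(")" + "".join(")" if x == "(" else "(" for x in cur[1:-1]))
--     return "".join(pre) + "".join(reversed(suf))
-- ===== Notes on version B (the rewrite author's own statement) =====
-- stated objective: alternative
-- what changed: Replaced A's recursive slice-and-rescan (ri re-scans each piece, recursion per piece, string concatenation per level) with a single left-to-right pass that tracks the running balance and a non-negativity flag, appends good pieces to a front list and inverted bad pieces to a back list, and joins once at the end.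
import Mathlib
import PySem

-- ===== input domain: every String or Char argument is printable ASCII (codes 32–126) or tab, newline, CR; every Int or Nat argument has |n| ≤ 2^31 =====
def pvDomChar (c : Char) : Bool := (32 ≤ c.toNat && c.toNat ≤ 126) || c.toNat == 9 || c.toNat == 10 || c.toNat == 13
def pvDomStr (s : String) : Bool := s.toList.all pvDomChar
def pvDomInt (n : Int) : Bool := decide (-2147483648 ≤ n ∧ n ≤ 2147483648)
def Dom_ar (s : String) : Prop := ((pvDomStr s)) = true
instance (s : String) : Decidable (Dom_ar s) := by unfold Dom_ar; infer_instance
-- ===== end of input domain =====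

-- B replaces A's recursive slice-and-rescan with a single pass that collects
-- front/back piece lists and joins once; return values proved equal on Dom.

-- ===== PORT A =====

-- ri: running count, return False as soon as it goes negative
def riA : Int → List Char → Bool
  | _, [] => true
  | cnt, c :: r =>
    if (if c = '(' then cnt + 1 else cnt - 1) < 0 then false
    else riA (if c = '(' then cnt + 1 else cnt - 1) r

-- the 'for i in range(len(s)) … break' loop of ar: returns i+1 (chars up to and
-- including the break position); on exhaustion Python leaves i = len(s)-1 and
-- u = s[:i+1] = s, which is exactly returning the full length here
def cutA : Int → List Char → Nat
  | _, [] => 0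
  | cnt, c :: r =>
    if (if c = '(' then cnt + 1 else cnt - 1) = 0 then 1
    else cutA (if c = '(' then cnt + 1 else cnt - 1) r + 1

theorem cutA_pos (cnt : Int) (c : Char) (r : List Char) : 1 ≤ cutA cnt (c :: r) := by
  show 1 ≤ (if (if c = '(' then cnt + 1 else cnt - 1) = 0 then 1
            else cutA (if c = '(' then cnt + 1 else cnt - 1) r + 1)
  by_cases h : (if c = '(' then cnt + 1 else cnt - 1) = 0
  · rw [if_pos h]
  · rw [if_neg h]; omega

-- the new_u loop over u[1:-1]
def flipA : List Char → List Char
  | [] => []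
  | c :: r => (if c = '(' then ')' else '(') :: flipA r

def arL : List Char → List Char
  | [] => []
  | c :: r =>
    let k := cutA 0 (c :: r)
    let u := (c :: r).take k
    let v := (c :: r).drop k
    if riA 0 u then u ++ arL v
    else '(' :: (arL v ++ ')' :: flipA ((u.drop 1).dropLast))
  termination_by l => l.length
  decreasing_by
    all_goals
      simp only [List.length_drop, List.length_cons]
      have := cutA_pos 0 c r
      omega

def ar (s : String) : String := String.ofList (arL s.toList)

-- ===== PORT B =====

-- state: (pre pieces, suf pieces, cnt, ok, current piece)
def StB := List (List Char) × List (List Char) × Int × Bool × List Char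

def flipB : List Char → List Char :=
  List.map (fun x => if x = '(' then ')' else '(')

def stepB : StB → Char → StB := fun st c =>
  let (pre, suf, cnt, ok, cur) := st
  let cur' := cur ++ [c]
  let cnt' := if c = '(' then cnt + 1 else cnt - 1
  let ok' := if cnt' < 0 then false else ok
  if cnt' = 0 then
    if ok' then (pre ++ [cur'], suf, 0, true, [])
    else (pre ++ [['(']], suf ++ [')' :: flipB ((cur'.drop 1).dropLast)], 0, true, [])
  else (pre, suf, cnt', ok', cur')

def finishB : StB → List Char := fun st =>
  let (pre, suf, _, ok, cur) := st
  let (pre', suf') :=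
    if cur = [] then (pre, suf)
    else if ok then (pre ++ [cur], suf)
    else (pre ++ [['(']], suf ++ [')' :: flipB ((cur.drop 1).dropLast)])
  pre'.flatten ++ suf'.reverse.flatten

def arB (l : List Char) : List Char :=
  finishB (l.foldl stepB ([], [], 0, true, []))

def ar_alt (s : String) : String := String.ofList (arB s.toList)

-- ===== PRECONDITION & SPEC =====
def Spec_ar (s : String) (out : String) : Prop := out = ar_alt s
instance (s : String) (out : String) : Decidable (Spec_ar s out) := by unfold Spec_ar; infer_instance

-- ===== CLAIM (what is proved, stated in full; the proofs are below) =====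
def Claim_equal_ar : Prop := ∀ (s : String), Dom_ar s → Spec_ar s (ar s)

-- ===== LEMMAS AND PROOFS =====

-- prefix-nonnegativity flag exactly as the B loop maintains it
def noNeg : Int → List Char → Bool
  | _, [] => true
  | cnt, c :: r =>
    if (if c = '(' then cnt + 1 else cnt - 1) < 0 then false
    else noNeg (if c = '(' then cnt + 1 else cnt - 1) r

theorem riA_eq_noNeg (l : List Char) : ∀ cnt, riA cnt l = noNeg cnt l := by
  induction l with
  | nil => intro cnt; rfl
  | cons c r ih =>
    intro cnt
    simp only [riA, noNeg]
    split <;> split <;> first | rfl | exact ih _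

-- whether the current piece closes (balance hits 0) somewhere inside l
def hasCut : Int → List Char → Bool
  | _, [] => false
  | cnt, c :: r =>
    if (if c = '(' then cnt + 1 else cnt - 1) = 0 then true
    else hasCut (if c = '(' then cnt + 1 else cnt - 1) r

-- final balance of l starting from cnt
def balEnd : Int → List Char → Int
  | cnt, [] => cnt
  | cnt, c :: r => balEnd (if c = '(' then cnt + 1 else cnt - 1) r

-- one full piece of the B fold, described by A's cutA/riA
theorem foldB_piece (l : List Char) :
    ∀ (cnt : Int) (cur : List Char) (ok : Bool) (pre suf : List (List Char)),
    l.foldl stepB (pre, suf, cnt, ok, cur) =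
      if hasCut cnt l then
        (if ok && riA cnt (l.take (cutA cnt l)) then
           (l.drop (cutA cnt l)).foldl stepB
             (pre ++ [cur ++ l.take (cutA cnt l)], suf, 0, true, [])
         else
           (l.drop (cutA cnt l)).foldl stepB
             (pre ++ [['(']],
              suf ++ [')' :: flipB (((cur ++ l.take (cutA cnt l)).drop 1).dropLast)],
              0, true, []))
      else (pre, suf, balEnd cnt l, ok && noNeg cnt l, cur ++ l) := by
  induction l with
  | nil =>
    intro cnt cur ok pre suf
    simp [hasCut, balEnd, noNeg]
  | cons c r ih =>
    intro cnt cur ok pre suf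
    by_cases h0 : (if c = '(' then cnt + 1 else cnt - 1) = 0
    · -- the piece closes at this character
      have hneg : ¬ ((if c = '(' then cnt + 1 else cnt - 1) < 0) := by omega
      have hHas : hasCut cnt (c :: r) = true := by simp only [hasCut, h0, if_true]
      have hCut : cutA cnt (c :: r) = 1 := by simp only [cutA, h0, if_true]
      have hri : riA cnt [c] = true := by simp [riA, h0]
      rw [List.foldl_cons, hHas, if_pos rfl, hCut]
      simp only [List.take_succ_cons, List.take_zero, List.drop_succ_cons, List.drop_zero, hri,
        Bool.and_true]
      by_cases hok : ok
      · rw [if_pos hok]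
        congr 1
        simp [stepB, h0, hok]
      · rw [if_neg hok]
        congr 1
        simp [stepB, h0, hok]
    · -- still inside the piece: one ordinary step, then the induction hypothesis
      have hStep : stepB (pre, suf, cnt, ok, cur) c =
          (pre, suf, (if c = '(' then cnt + 1 else cnt - 1),
            (if (if c = '(' then cnt + 1 else cnt - 1) < 0 then false else ok),
            cur ++ [c]) := by
        simp only [stepB, h0, if_false]
      rw [List.foldl_cons, hStep, ih]
      have hHas : hasCut cnt (c :: r) = hasCut (if c = '(' then cnt + 1 else cnt - 1) r := by
        simp only [hasCut, h0, if_false]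
      have hCut : cutA cnt (c :: r) = cutA (if c = '(' then cnt + 1 else cnt - 1) r + 1 := by
        simp only [cutA, h0, if_false]
      have hBal : balEnd cnt (c :: r) = balEnd (if c = '(' then cnt + 1 else cnt - 1) r := by
        simp only [balEnd]
      have hokri : ∀ x, ((if (if c = '(' then cnt + 1 else cnt - 1) < 0 then false else ok)
            && riA (if c = '(' then cnt + 1 else cnt - 1) x) = (ok && riA cnt (c :: x)) := by
        intro x
        by_cases hneg : (if c = '(' then cnt + 1 else cnt - 1) < 0
        · simp only [riA, hneg, if_true, Bool.false_and, Bool.and_false]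
        · simp only [riA, hneg, if_false]
      have hoknn : ((if (if c = '(' then cnt + 1 else cnt - 1) < 0 then false else ok)
            && noNeg (if c = '(' then cnt + 1 else cnt - 1) r) = (ok && noNeg cnt (c :: r)) := by
        by_cases hneg : (if c = '(' then cnt + 1 else cnt - 1) < 0
        · simp only [noNeg, hneg, if_true, Bool.false_and, Bool.and_false]
        · simp only [noNeg, hneg, if_false]
      rw [hHas, hCut, hBal, hoknn]
      simp only [List.take_succ_cons, List.drop_succ_cons, List.append_assoc,
        List.singleton_append, hokri]

-- if no cut happens, cutA consumes everything
theorem cutA_no_cut (l : List Char) :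
    ∀ cnt, hasCut cnt l = false → cutA cnt l = l.length := by
  induction l with
  | nil => intro cnt _; rfl
  | cons c r ih =>
    intro cnt h
    simp only [hasCut] at h
    by_cases h0 : (if c = '(' then cnt + 1 else cnt - 1) = 0
    · simp [h0] at h
    · rw [if_neg h0] at h
      simp only [cutA, h0, if_false, ih _ h, List.length_cons]

theorem flipA_eq_flipB (l : List Char) : flipA l = flipB l := by
  induction l with
  | nil => rfl
  | cons c r ih => simp only [flipA, flipB, List.map_cons, ih]

-- the main loop-fusion invariant
theorem main_inv (n : Nat) : ∀ (l : List Char), l.length ≤ n →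
    ∀ (pre suf : List (List Char)),
    finishB (l.foldl stepB (pre, suf, 0, true, [])) =
      pre.flatten ++ arL l ++ suf.reverse.flatten := by
  induction n with
  | zero =>
    intro l hl pre suf
    have : l = [] := by cases l <;> simp_all
    subst this
    simp [finishB, arL]
  | succ n ih =>
    intro l hl pre suf
    cases l with
    | nil => simp [finishB, arL]
    | cons c r =>
      rw [foldB_piece]
      have harL : arL (c :: r) =
          (if riA 0 ((c :: r).take (cutA 0 (c :: r))) then
            (c :: r).take (cutA 0 (c :: r)) ++ arL ((c :: r).drop (cutA 0 (c :: r)))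
           else '(' :: (arL ((c :: r).drop (cutA 0 (c :: r))) ++
             ')' :: flipA ((((c :: r).take (cutA 0 (c :: r))).drop 1).dropLast))) := by
        rw [arL]
      by_cases hc : hasCut 0 (c :: r)
      · -- a piece closes inside l : recurse on the remainder
        rw [if_pos hc]
        have hk1 := cutA_pos 0 c r
        have hvlen : ((c :: r).drop (cutA 0 (c :: r))).length ≤ n := by
          simp only [List.length_drop, List.length_cons]
          simp only [List.length_cons] at hl
          omega
        by_cases hgood : riA 0 ((c :: r).take (cutA 0 (c :: r)))
        · rw [if_pos (by simp [hgood]), List.nil_append, ih _ hvlen, harL]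
          try rw [if_pos hgood]
          try simp [List.append_assoc]
        · rw [if_neg (by simp [hgood]), List.nil_append, ih _ hvlen, harL]
          try rw [if_neg hgood]
          try simp [flipA_eq_flipB, List.append_assoc]
      · -- no piece closes: the whole string is one leftover piece
        rw [if_neg hc, Bool.true_and]
        have hcut : cutA 0 (c :: r) = (c :: r).length :=
          cutA_no_cut _ _ (by simpa using hc)
        rw [hcut, List.take_length, List.drop_length] at harL
        have hri : riA 0 (c :: r) = noNeg 0 (c :: r) := riA_eq_noNeg _ _
        by_cases hok : noNeg 0 (c :: r)
        · simp only [finishB, List.nil_append, List.cons_ne_nil, if_false, hok, if_true]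
          rw [harL, if_pos (by rw [hri]; exact hok)]
          simp [arL]
        · have hok' : noNeg 0 (c :: r) = false := by simpa using hok
          simp only [finishB, List.nil_append, List.cons_ne_nil, if_false, hok',
            Bool.false_eq_true]
          rw [harL, if_neg (by rw [hri, hok']; simp)]
          simp [arL, flipA_eq_flipB]

-- ===== VERDICT (by name: the statement is the Claim_ definition above) =====
theorem ar_spec : Claim_equal_ar := by
  intro s _
  unfold Spec_ar ar ar_alt arB
  rw [main_inv s.toList.length s.toList le_rfl [] []]
  simp
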